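-- pv_equiv track=rewrite | github.com/AnimeshJaiswal11/leetcode-solutions | leet.py | max_runs
-- ===== SOURCE A (Python) =====
-- def max_runs(k,n):
--     ans = 0
--     for i in range(1,n+1):
--         if i % k == 0:
--             ans += 1
--         else:
--             ans += 2
--     return ans
-- ===== SOURCE B (Python) =====
-- def max_runs(k, n):
--     if n < 1:
--         return 0
--     return 2 * n - n // abs(k)
-- ===== Notes on version B (the rewrite author's own statement) =====
-- stated objective: faster
-- what changed: Replaces the O(n) loop over 1..n with the closed form 2*n - n//abs(k) (the loop adds 2 per i minus 1 per multiple of k).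
import Mathlib
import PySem

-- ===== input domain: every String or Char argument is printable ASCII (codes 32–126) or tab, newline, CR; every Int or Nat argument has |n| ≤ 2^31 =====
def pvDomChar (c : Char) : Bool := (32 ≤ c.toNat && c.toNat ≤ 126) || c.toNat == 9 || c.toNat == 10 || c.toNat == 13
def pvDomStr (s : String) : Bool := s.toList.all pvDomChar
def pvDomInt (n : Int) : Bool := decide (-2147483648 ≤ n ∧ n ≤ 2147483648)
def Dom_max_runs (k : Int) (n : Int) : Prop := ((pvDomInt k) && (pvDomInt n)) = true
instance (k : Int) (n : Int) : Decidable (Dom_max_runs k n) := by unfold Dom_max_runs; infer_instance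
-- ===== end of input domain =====

-- B replaces A's O(n) loop by the closed form 2*n - n//abs(k); equal on Pre_ (k ≠ 0 or n < 1).

-- ===== PORT A =====
def max_runs (k : Int) (n : Int) : Int :=
  (PySem.List.pyRange 1 (n + 1) 1).foldl
    (fun ans i => if PySem.Int.mod i k = 0 then ans + 1 else ans + 2) 0

-- ===== PORT B =====
def max_runs_alt (k : Int) (n : Int) : Int :=
  if n < 1 then 0 else 2 * n - PySem.Int.floordiv n |k|

-- ===== PRECONDITION & SPEC =====
-- Pre_ excludes exactly the inputs where Python A raises ZeroDivisionError (k = 0 with a nonempty loop).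
def Pre_max_runs (k : Int) (n : Int) : Prop := k ≠ 0 ∨ n < 1
instance (k : Int) (n : Int) : Decidable (Pre_max_runs k n) := by unfold Pre_max_runs; infer_instance
def pvWitness_max_runs : Int × Int := (3, 10)
def Spec_max_runs (k : Int) (n : Int) (out : Int) : Prop := out = max_runs_alt k n
instance (k : Int) (n : Int) (out : Int) : Decidable (Spec_max_runs k n out) := by unfold Spec_max_runs; infer_instance

-- ===== CLAIM =====
def Claim_equal_max_runs : Prop := ∀ (k : Int) (n : Int), Dom_max_runs k n → Pre_max_runs k n → Spec_max_runs k n (max_runs k n)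

-- ===== LEMMAS AND PROOFS =====

lemma max_runs_loop (k : Int) (hk : k ≠ 0) : ∀ (m : Nat) (a : Int),
    (PySem.List.pyRange 1 ((m : Int) + 1) 1).foldl
      (fun ans i => if PySem.Int.mod i k = 0 then ans + 1 else ans + 2) a
      = a + 2 * (m : Int) - ((m / k.natAbs : Nat) : Int) := by
  intro m
  induction m with
  | zero =>
    intro a
    simp
  | succ m ih =>
    intro a
    rw [show ((m + 1 : Nat) : Int) + 1 = ((m : Int) + 1) + 1 by push_cast; ring,
        PySem.List.pyRange_one_succ_right (by omega), List.foldl_append, ih]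
    simp only [List.foldl_cons, List.foldl_nil]
    have hdvd : PySem.Int.mod ((m : Int) + 1) k = 0 ↔ k.natAbs ∣ (m + 1) := by
      rw [PySem.Int.mod_eq_zero_iff_dvd]
      constructor
      · intro h
        exact_mod_cast Int.natAbs_dvd_natAbs.mpr h
      · intro h
        exact Int.natAbs_dvd.mp (by exact_mod_cast h)
    rw [Nat.succ_div]
    by_cases h : k.natAbs ∣ (m + 1)
    · rw [if_pos (hdvd.mpr h)]
      simp [h]; ring
    · rw [if_neg (fun hc => h (hdvd.mp hc))]
      simp [h]; ring

-- ===== VERDICT =====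
theorem max_runs_spec : Claim_equal_max_runs := by
  intro k n _ hpre
  unfold Spec_max_runs max_runs max_runs_alt
  by_cases hn : n < 1
  · rw [if_pos hn, PySem.List.pyRange_one_eq_nil (by omega)]
    rfl
  · have hk : k ≠ 0 := hpre.resolve_right hn
    rw [if_neg hn]
    have hn0 : (0:Int) ≤ n := by omega
    have hnn : n = ((n.toNat : Nat) : Int) := by omega
    rw [hnn, max_runs_loop k hk n.toNat 0]
    have habs : |k| = ((k.natAbs : Nat) : Int) := by
      rw [Int.abs_eq_natAbs]
    rw [habs, PySem.Int.floordiv_natCast]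
    ring
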